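-- pv_equiv track=rewrite | github.com/mouredev/roadmap-retos-programacion | Roadmap/02 - FUNCIONES Y ALCANCE/python/inkhemi.py | par_fibonacci
-- ===== SOURCE A (Python) =====
-- def par_fibonacci(number: int) -> bool:
--     def is_par(number: int) -> bool:
--         return number % 2 == 0
--
--     def is_fibonacci(number: int) -> bool:
--         a, b = 0, 1
--         while a < number:
--             a, b = b, a + b
--         return a == number
--
--     if is_par(number) and is_fibonacci(number):
--         return True
--     return False
--
-- number = 2
-- ===== SOURCE B (Python) =====
-- def par_fibonacci(number: int) -> bool:
--     if number < 0 or number % 2 != 0: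
--         return False
--
--     def is_square(x: int) -> bool:
--         if x < 0:
--             return False
--         if x == 0:
--             return True
--         # Newton's method integer square root
--         g = x
--         while True:
--             h = (g + x // g) // 2
--             if h >= g:
--                 break
--             g = h
--         return g * g == x
--
--     m = 5 * number * number
--     return is_square(m + 4) or is_square(m - 4)
-- ===== Notes on version B (the rewrite author's own statement) =====
-- stated objective: alternative
-- what changed: Replaced the iterate-fibonacci-pairs-until-the-target membership loop by the closed-form number-theoretic test that a non-negative integer is Fibonacci iff five times its square plus or minus four is a perfect square, checked with a hand-written Newton integer square root.
import Mathlib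
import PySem

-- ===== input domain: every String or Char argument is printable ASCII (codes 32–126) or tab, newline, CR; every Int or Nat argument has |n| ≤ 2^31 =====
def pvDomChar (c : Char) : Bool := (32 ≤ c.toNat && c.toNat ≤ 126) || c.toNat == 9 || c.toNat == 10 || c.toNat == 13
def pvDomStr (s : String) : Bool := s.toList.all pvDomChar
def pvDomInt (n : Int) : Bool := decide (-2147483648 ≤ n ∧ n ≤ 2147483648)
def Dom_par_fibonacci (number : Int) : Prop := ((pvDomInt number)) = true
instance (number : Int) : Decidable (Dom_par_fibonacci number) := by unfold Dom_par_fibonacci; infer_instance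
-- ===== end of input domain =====

-- B replaces A's iterate-until-≥n Fibonacci loop by the closed-form 5n²±4 perfect-square
-- test (with a hand-written Newton integer square root); objective: alternative algorithm.

-- ===== PORT A =====
-- the while loop of is_fibonacci; the Prop arguments only justify termination
def pvFibLoop (n a b : Int) (ha : 0 ≤ a) (hab : a ≤ b) (hb : 1 ≤ b) : Int :=
  if a < n then pvFibLoop n b (a + b) (by omega) (by omega) (by omega) else a
termination_by ((n - a).toNat, (n - b).toNat)
decreasing_by simp only [Prod.lex_iff]; omega

def pvIsPar (number : Int) : Bool := PySem.Int.mod number 2 == 0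

def pvIsFibonacci (number : Int) : Bool :=
  pvFibLoop number 0 1 (by omega) (by omega) (by omega) == number

def par_fibonacci (number : Int) : Bool :=
  if pvIsPar number && pvIsFibonacci number then true else false

-- ===== PORT B =====
-- invariant needed by pvNewton's termination proof (the next iterate stays ≥ 1)
theorem pvNewton_h_pos (x g : Int) (hx : 1 ≤ x) (hg : 1 ≤ g) :
    1 ≤ PySem.Int.floordiv (g + PySem.Int.floordiv x g) 2 := by
  rw [PySem.Int.floordiv_eq_ediv_of_pos (by omega : (0:Int) < 2),
      PySem.Int.floordiv_eq_ediv_of_pos (by omega : (0:Int) < g)]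
  have hq : 0 ≤ x / g := Int.ediv_nonneg (by omega) (by omega)
  have h2 : 2 ≤ g + x / g := by
    rcases eq_or_lt_of_le hg with h1 | h1
    · have hxg : x / g = x := by rw [← h1]; simp
      omega
    · omega
  omega

-- Newton's-method integer square root loop from Source B's is_square (x ≥ 1)
def pvNewton (x g : Int) (hx : 1 ≤ x) (hg : 1 ≤ g) : Int :=
  if g ≤ PySem.Int.floordiv (g + PySem.Int.floordiv x g) 2 then g
  else pvNewton x (PySem.Int.floordiv (g + PySem.Int.floordiv x g) 2) hx (pvNewton_h_pos x g hx hg)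
termination_by g.toNat
decreasing_by have := pvNewton_h_pos x g hx hg; omega

def pvIsSquare (x : Int) : Bool :=
  if _h0 : x < 0 then false
  else if _h1 : x = 0 then true
  else (pvNewton x x (by omega) (by omega)) * (pvNewton x x (by omega) (by omega)) == x

def par_fibonacci_alt (number : Int) : Bool :=
  if number < 0 ∨ PySem.Int.mod number 2 ≠ 0 then false
  else pvIsSquare (5 * number * number + 4) || pvIsSquare (5 * number * number - 4)

-- ===== PRECONDITION & SPEC =====
def Spec_par_fibonacci (number : Int) (out : Bool) : Prop := out = par_fibonacci_alt number
instance (number : Int) (out : Bool) : Decidable (Spec_par_fibonacci number out) := by unfold Spec_par_fibonacci; infer_instance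

-- ===== CLAIM (what is proved, stated in full; the proofs are below) =====
def Claim_equal_par_fibonacci : Prop := ∀ (number : Int), Dom_par_fibonacci number → Spec_par_fibonacci number (par_fibonacci number)

-- ===== LEMMAS AND PROOFS =====

-- Lucas numbers (proof tool only)
def pvLuc : ℕ → ℕ
  | 0 => 2
  | 1 => 1
  | k+2 => pvLuc (k+1) + pvLuc k

theorem pvLuc_eq (k : ℕ) : (pvLuc k : ℤ) = 2 * Nat.fib (k+1) - Nat.fib k := by
  induction k using Nat.twoStepInduction with
  | zero => simp [pvLuc]
  | one => simp [pvLuc]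
  | more k ih1 ih2 =>
      have h3 : (Nat.fib (k+2+1) : ℤ) = Nat.fib (k+1) + Nat.fib (k+1+1) := by
        exact_mod_cast Nat.fib_add_two
      have h2 : (Nat.fib (k+1+1) : ℤ) = Nat.fib k + Nat.fib (k+1) := by
        exact_mod_cast Nat.fib_add_two
      have h4 : (Nat.fib (k+2) : ℤ) = (Nat.fib (k+1+1) : ℤ) := rfl
      have hl : (pvLuc (k+2) : ℤ) = pvLuc (k+1) + pvLuc k := by
        push_cast [pvLuc]; ring
      rw [hl, ih1, ih2]
      rw [h4, h3]
      omega

theorem pvCassini (k : ℕ) :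
    ((Nat.fib (k+1) : ℤ))^2 - Nat.fib (k+1) * Nat.fib k - ((Nat.fib k : ℤ))^2 = (-1)^k := by
  induction k with
  | zero => simp
  | succ n ih =>
      have h : (Nat.fib (n+2) : ℤ) = Nat.fib n + Nat.fib (n+1) := by
        exact_mod_cast Nat.fib_add_two
      rw [h, pow_succ]
      linear_combination (-1 : ℤ) * ih

theorem pvLuc_sq (k : ℕ) : (pvLuc k : ℤ)^2 = 5 * ((Nat.fib k : ℤ))^2 + 4 * (-1)^k := by
  rw [pvLuc_eq k]
  linear_combination (4 : ℤ) * pvCassini k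

theorem pell_of_fib (k : ℕ) :
    (pvLuc k : ℤ) * pvLuc k = 5 * (Nat.fib k : ℤ) * Nat.fib k + 4 ∨
    (pvLuc k : ℤ) * pvLuc k = 5 * (Nat.fib k : ℤ) * Nat.fib k - 4 := by
  have h := pvLuc_sq k
  rcases Nat.even_or_odd k with he | ho
  · left
    have hp : (-1:ℤ)^k = 1 := he.neg_one_pow
    rw [hp] at h; linear_combination h
  · right
    have hp : (-1:ℤ)^k = -1 := ho.neg_one_pow
    rw [hp] at h; linear_combination h

-- descent: a solution of s² = 5n² ± 4 is a (Fibonacci, Lucas) pair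
theorem fib_of_pell : ∀ (N : ℕ) (n s : ℤ), n.toNat ≤ N → 0 ≤ n → 0 ≤ s →
    (s * s = 5*n*n + 4 ∨ s * s = 5*n*n - 4) →
    ∃ k, (Nat.fib k : ℤ) = n ∧ (pvLuc k : ℤ) = s := by
  intro N
  induction N with
  | zero =>
      intro n s hN hn hs heq
      have hn0 : n = 0 := by omega
      subst hn0
      have hs2 : s = 2 := by rcases heq with h | h <;> nlinarith
      subst hs2
      exact ⟨0, by simp, by decide⟩
  | succ N ih =>
      intro n s hN hn hs heq
      by_cases h0 : n = 0
      · subst h0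
        have hs2 : s = 2 := by rcases heq with h | h <;> nlinarith
        subst hs2
        exact ⟨0, by simp, by decide⟩
      by_cases h1 : n = 1
      · subst h1
        rcases heq with h | h
        · have hs3 : s = 3 := by nlinarith
          subst hs3; exact ⟨2, by decide, by decide⟩
        · have hs3 : s = 1 := by nlinarith
          subst hs3; exact ⟨1, by decide, by decide⟩
      have hn2 : 2 ≤ n := by omega
      have hev : Even (s - n) := by
        have h2 : Even (s*s - n*n) := by
          rcases heq with h | h
          · exact ⟨2*n*n + 2, by rw [h]; ring⟩
          · exact ⟨2*n*n - 2, by rw [h]; ring⟩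
        rw [Int.even_sub] at h2 ⊢
        simpa [Int.even_mul, or_self] using h2
      obtain ⟨m, hm⟩ := hev
      have hsn : n < s := by rcases heq with h | h <;> nlinarith
      have hm1 : 1 ≤ m := by omega
      have hs3 : s < 3 * n := by rcases heq with h | h <;> nlinarith
      have hmn : m < n := by omega
      have hs' : s = n + 2*m := by omega
      have hteq : (2*n - m) * (2*n - m) = 5*m*m + 4 ∨ (2*n - m)*(2*n - m) = 5*m*m - 4 := by
        rcases heq with h | h
        · right; rw [hs'] at h; linear_combination -h
        · left; rw [hs'] at h; linear_combination -h
      obtain ⟨k, hfk, hlk⟩ := ih m (2*n - m) (by omega) (by omega) (by omega) hteq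
      have hle := pvLuc_eq k
      have hle2 := pvLuc_eq (k+1)
      have hfe : (Nat.fib (k+1+1) : ℤ) = Nat.fib k + Nat.fib (k+1) := by
        exact_mod_cast Nat.fib_add_two
      exact ⟨k+1, by omega, by omega⟩

-- proof irrelevance congruence for the loop
theorem pvFibLoop_congr (n a b a' b' : Int) (h2 : a = a') (h3 : b = b')
    (ha : 0 ≤ a) (hab : a ≤ b) (hb : 1 ≤ b)
    (ha' : 0 ≤ a') (hab' : a' ≤ b') (hb' : 1 ≤ b') :
    pvFibLoop n a b ha hab hb = pvFibLoop n a' b' ha' hab' hb' := by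
  subst h2; subst h3; rfl

-- the loop only ever returns Fibonacci numbers
theorem pvFibLoop_sound : ∀ (M : ℕ) (n a b : Int) (ha : 0 ≤ a) (hab : a ≤ b) (hb : 1 ≤ b) (k : ℕ),
    ((2*n - a - b).toNat + (if a < n then 1 else 0)) ≤ M →
    a = (Nat.fib k : ℤ) → b = (Nat.fib (k+1) : ℤ) →
    ∃ m, pvFibLoop n a b ha hab hb = (Nat.fib m : ℤ) := by
  intro M
  induction M with
  | zero =>
      intro n a b ha hab hb k hM h1 h2
      have hnl : ¬ a < n := by by_contra hc; simp [hc] at hM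
      rw [pvFibLoop, if_neg hnl]
      exact ⟨k, h1⟩
  | succ M ihM =>
      intro n a b ha hab hb k hM h1 h2
      by_cases hlt : a < n
      · rw [pvFibLoop, if_pos hlt]
        refine ihM n b (a+b) _ _ _ (k+1) ?_ h2 ?_
        · simp only [if_pos hlt] at hM
          split_ifs <;> omega
        · rw [h1, h2]; exact_mod_cast (Nat.fib_add_two).symm
      · rw [pvFibLoop, if_neg hlt]
        exact ⟨k, h1⟩

-- starting from a Fibonacci pair below a Fibonacci target, the loop hits the target
theorem pvFibLoop_complete (j : ℕ) : ∀ (d k : ℕ), j ≤ k + d →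
    (Nat.fib k : ℤ) ≤ (Nat.fib j : ℤ) →
    ∀ (ha : (0:ℤ) ≤ Nat.fib k) (hab : (Nat.fib k : ℤ) ≤ Nat.fib (k+1)) (hb : (1:ℤ) ≤ Nat.fib (k+1)),
    pvFibLoop ((Nat.fib j : ℤ)) ((Nat.fib k : ℤ)) ((Nat.fib (k+1) : ℤ)) ha hab hb = (Nat.fib j : ℤ) := by
  intro d
  induction d with
  | zero =>
      intro k hd hle ha hab hb
      have hjk : Nat.fib j ≤ Nat.fib k := Nat.fib_mono (by omega)
      have hjk' : (Nat.fib j : ℤ) ≤ Nat.fib k := by exact_mod_cast hjk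
      rw [pvFibLoop, if_neg (by omega)]
      omega
  | succ d ihd =>
      intro k hd hle ha hab hb
      by_cases hlt : (Nat.fib k : ℤ) < (Nat.fib j : ℤ)
      · rw [pvFibLoop, if_pos hlt]
        have hkj : k < j := by
          by_contra hc
          push_neg at hc
          have hc2 : (Nat.fib j : ℤ) ≤ Nat.fib k := by exact_mod_cast Nat.fib_mono hc
          omega
        have hsum : (Nat.fib k : ℤ) + (Nat.fib (k+1)) = ((Nat.fib (k+1+1) : ℕ) : ℤ) := by
          exact_mod_cast (Nat.fib_add_two).symm
        have hmono : (Nat.fib (k+1) : ℤ) ≤ Nat.fib j := by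
          exact_mod_cast Nat.fib_mono (show k+1 ≤ j by omega)
        refine Eq.trans (pvFibLoop_congr _ _ _ _ _ rfl hsum _ _ _ ?_ ?_ ?_) (ihd (k+1) (by omega) hmono _ _ _)
        · exact Int.natCast_nonneg _
        · exact_mod_cast Nat.fib_mono (by omega)
        · exact_mod_cast Nat.succ_le_of_lt (Nat.fib_pos.mpr (by omega))
      · rw [pvFibLoop, if_neg hlt]
        omega

theorem pvIsFib_iff (n : Int) : pvIsFibonacci n = true ↔ ∃ k, (Nat.fib k : ℤ) = n := by
  unfold pvIsFibonacci
  rw [beq_iff_eq]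
  constructor
  · intro h
    obtain ⟨m, hm⟩ := pvFibLoop_sound ((2*n - 0 - 1).toNat + (if (0:ℤ) < n then 1 else 0))
      n 0 1 (by omega) (by omega) (by omega) 0 (le_refl _) (by simp) (by simp)
    exact ⟨m, by rw [← h, hm]⟩
  · rintro ⟨k, hk⟩
    have e0 : (0:ℤ) = ((Nat.fib 0 : ℕ) : ℤ) := by simp
    have e1 : (1:ℤ) = ((Nat.fib 1 : ℕ) : ℤ) := by simp
    have hle : (Nat.fib 0 : ℤ) ≤ (Nat.fib k : ℤ) := by
      simpa using (Int.natCast_nonneg (Nat.fib k))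
    rw [← hk]
    exact Eq.trans (pvFibLoop_congr _ _ _ _ _ e0 e1 _ _ _ (by simp) (by simp) (by simp))
      (pvFibLoop_complete k k 0 (by omega) hle _ _ _)

-- Newton's iteration computes ⌊√x⌋
theorem pvNewton_eq : ∀ (G : ℕ) (x g : Int) (hx : 1 ≤ x) (hg : 1 ≤ g), g.toNat ≤ G →
    (Nat.sqrt x.toNat : ℤ) ≤ g → pvNewton x g hx hg = (Nat.sqrt x.toNat : ℤ) := by
  intro G
  induction G with
  | zero => intro x g hx hg hG hs; exact absurd hG (by omega)
  | succ G ihG =>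
      intro x g hx hg hG hs
      have hg0 : (0:ℤ) < g := by omega
      have hfd : PySem.Int.floordiv x g = x / g := PySem.Int.floordiv_eq_ediv_of_pos hg0
      have hq0 : 0 ≤ x / g := Int.ediv_nonneg (by omega) (by omega)
      have hfd2 : PySem.Int.floordiv (g + PySem.Int.floordiv x g) 2 = (g + x / g) / 2 := by
        rw [hfd]; exact PySem.Int.floordiv_eq_ediv_of_pos (by omega)
      have hdm : g * (x / g) + x % g = x := Int.ediv_add_emod x g
      have hr0 : 0 ≤ x % g := Int.emod_nonneg x (by omega)
      have hrg : x % g < g := Int.emod_lt_of_pos x hg0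
      have hdm2 : 2 * ((g + x / g) / 2) + (g + x / g) % 2 = g + x / g := Int.ediv_add_emod _ 2
      have hr20 : 0 ≤ (g + x / g) % 2 := Int.emod_nonneg _ (by omega)
      have hr22 : (g + x / g) % 2 < 2 := Int.emod_lt_of_pos _ (by omega)
      have hxt : (x.toNat : ℤ) = x := Int.toNat_of_nonneg (by omega)
      have hsq : (Nat.sqrt x.toNat : ℤ) * (Nat.sqrt x.toNat) ≤ x := by
        have hns := Nat.sqrt_le' x.toNat
        rw [pow_two] at hns
        have : ((Nat.sqrt x.toNat * Nat.sqrt x.toNat : ℕ) : ℤ) ≤ (x.toNat : ℤ) := by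
          exact_mod_cast hns
        push_cast at this
        omega
      have hs0 : (0:ℤ) ≤ (Nat.sqrt x.toNat : ℤ) := Int.natCast_nonneg _
      rw [pvNewton]
      by_cases hge : g ≤ PySem.Int.floordiv (g + PySem.Int.floordiv x g) 2
      · rw [if_pos hge]
        rw [hfd2] at hge
        have hq1 : g ≤ x / g := by omega
        have hgg : g * g ≤ x := by nlinarith
        have hgs : g.toNat ≤ Nat.sqrt x.toNat := by
          rw [Nat.le_sqrt]
          zify
          rw [Int.toNat_of_nonneg (by omega : (0:ℤ) ≤ g), hxt]
          exact hgg
        omega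
      · rw [if_neg hge]
        rw [hfd2] at hge
        push_neg at hge
        have hs1 : (Nat.sqrt x.toNat : ℤ) ≤ (g + x / g) / 2 := by
          set s : ℤ := (Nat.sqrt x.toNat : ℤ) with hsdef
          have k1 : g*g + x ≥ 2*s*g := by nlinarith [sq_nonneg (g - s)]
          have k2 : g + x / g ≥ 2*s := by
            by_contra hc
            push_neg at hc
            have hc1 : g + x / g ≤ 2*s - 1 := by omega
            have hc2 : g * (g + x / g) ≤ g * (2*s - 1) :=
              mul_le_mul_of_nonneg_left hc1 (by omega)
            have e1 : g * (g + x / g) = g*g + g*(x/g) := by ring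
            nlinarith
          omega
        have hpos := pvNewton_h_pos x g hx hg
        rw [hfd2] at hpos
        have := ihG x ((g + x/g)/2) hx (by omega) (by omega) hs1
        calc pvNewton x (PySem.Int.floordiv (g + PySem.Int.floordiv x g) 2) hx
              (pvNewton_h_pos x g hx hg)
            = pvNewton x ((g + x/g)/2) hx (by omega) := by
              congr 1
          _ = (Nat.sqrt x.toNat : ℤ) := this

theorem pvIsSquare_iff (x : Int) : pvIsSquare x = true ↔ ∃ s : ℤ, 0 ≤ s ∧ s * s = x := by
  unfold pvIsSquare
  split_ifs with h0 h1
  · simp only [Bool.false_eq_true, false_iff]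
    rintro ⟨s, hs0, hse⟩
    nlinarith
  · subst h1
    simp only [true_iff]
    exact ⟨0, le_refl _, by ring⟩
  · have hx1 : (1:ℤ) ≤ x := by omega
    have hxt : (x.toNat : ℤ) = x := Int.toNat_of_nonneg (by omega)
    have hsx : (Nat.sqrt x.toNat : ℤ) ≤ x := by
      have := Nat.sqrt_le_self x.toNat
      have : ((Nat.sqrt x.toNat : ℕ) : ℤ) ≤ (x.toNat : ℤ) := by exact_mod_cast this
      omega
    have hnewton : pvNewton x x (by omega) (by omega) = (Nat.sqrt x.toNat : ℤ) :=
      pvNewton_eq x.toNat x x (by omega) (by omega) (le_refl _) hsx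
    rw [beq_iff_eq, hnewton]
    constructor
    · intro h
      exact ⟨(Nat.sqrt x.toNat : ℤ), Int.natCast_nonneg _, h⟩
    · rintro ⟨t, ht0, hte⟩
      have htt : (t.toNat : ℤ) = t := Int.toNat_of_nonneg ht0
      have he : x.toNat = t.toNat * t.toNat := by
        have : ((t.toNat * t.toNat : ℕ) : ℤ) = (x.toNat : ℤ) := by
          push_cast
          rw [htt, hxt, hte]
        exact_mod_cast this.symm
      have hst : Nat.sqrt x.toNat = t.toNat := by rw [he, ← pow_two, Nat.sqrt_eq']
      rw [hst, htt, hte]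

theorem par_fibonacci_main (n : Int) : par_fibonacci n = par_fibonacci_alt n := by
  by_cases hneg : n < 0
  · have hA : par_fibonacci n = false := by
      have hnf : pvIsFibonacci n = false := by
        cases hf : pvIsFibonacci n
        · rfl
        · exfalso
          obtain ⟨k, hk⟩ := (pvIsFib_iff n).mp hf
          have := Int.natCast_nonneg (Nat.fib k)
          omega
      unfold par_fibonacci
      rw [hnf]
      simp
    have hB : par_fibonacci_alt n = false := by
      unfold par_fibonacci_alt
      rw [if_pos (Or.inl hneg)]
    rw [hA, hB]
  · push_neg at hneg
    by_cases hpar : PySem.Int.mod n 2 = 0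
    · have hA : par_fibonacci n = pvIsFibonacci n := by
        unfold par_fibonacci pvIsPar
        rw [hpar]
        simp
      have hB : par_fibonacci_alt n =
          (pvIsSquare (5 * n * n + 4) || pvIsSquare (5 * n * n - 4)) := by
        unfold par_fibonacci_alt
        rw [if_neg (by push_neg; exact ⟨by omega, hpar⟩)]
      rw [hA, hB]
      have hiff : pvIsFibonacci n = true ↔
          (pvIsSquare (5 * n * n + 4) || pvIsSquare (5 * n * n - 4)) = true := by
        rw [pvIsFib_iff, Bool.or_eq_true, pvIsSquare_iff, pvIsSquare_iff]
        constructor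
        · rintro ⟨k, hk⟩
          rcases pell_of_fib k with h | h
          · exact Or.inl ⟨pvLuc k, Int.natCast_nonneg _, by rw [← hk]; exact h⟩
          · exact Or.inr ⟨pvLuc k, Int.natCast_nonneg _, by rw [← hk]; exact h⟩
        · rintro (⟨s, hs0, hse⟩ | ⟨s, hs0, hse⟩)
          · obtain ⟨k, hk, -⟩ := fib_of_pell n.toNat n s (le_refl _) hneg hs0 (Or.inl hse)
            exact ⟨k, hk⟩
          · obtain ⟨k, hk, -⟩ := fib_of_pell n.toNat n s (le_refl _) hneg hs0 (Or.inr hse)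
            exact ⟨k, hk⟩
      cases e1 : pvIsFibonacci n <;>
        cases e2 : (pvIsSquare (5 * n * n + 4) || pvIsSquare (5 * n * n - 4)) <;>
        simp_all
    · have hA : par_fibonacci n = false := by
        unfold par_fibonacci pvIsPar
        have hne : (PySem.Int.mod n 2 == 0) = false := by
          simp only [beq_eq_false_iff_ne, ne_eq]
          exact hpar
        rw [hne]
        simp
      have hB : par_fibonacci_alt n = false := by
        unfold par_fibonacci_alt
        rw [if_pos (Or.inr hpar)]
      rw [hA, hB]

-- ===== VERDICT (by name: the statement is the Claim_ definition above) =====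
theorem par_fibonacci_spec : Claim_equal_par_fibonacci := by
  intro n _
  unfold Spec_par_fibonacci
  exact par_fibonacci_main n
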